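-- pv_equiv track=rewrite | github.com/aroob6/codingTestWithSwiftAndPython | trainCodingTest/section4/3. 뮤직비디오(결정알고리즘).py | solution
-- ===== SOURCE A (Python) =====
-- def solution(n,m,arr):
--     def Count(amount):
--         cnt = 1
--         sum = 0
--         for x in arr:
--             if sum+x > amount: #sum+x가 mid값 보다 크면
--                 cnt += 1 # 개수 증가
--                 sum = x # sum을 x로 초기화
--             else:
--                 sum += x
--         return cnt
--
--     res = 0
--     lt = 1
--     rt = sum(arr)
--
--     while lt <= rt:
--         mid = (lt+rt) // 2
--
--         if mid >= max(arr) and Count(mid) <= m: #최소를 구함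
--             res = mid
--             rt = mid -1
--         else:
--             lt = mid + 1
--
--     return res
-- ===== SOURCE B (Python) =====
-- def solution(n, m, arr):
--     # Event-driven upward scan over candidate thresholds instead of A's binary
--     # search: starting at max(arr), test the greedy segment count and, when a
--     # threshold fails, jump directly to the smallest segment sum that overflowed
--     # it (the next threshold at which the greedy partition can change at all);
--     # return the first feasible threshold, 0 when none exists up to sum(arr).
--     def count_and_next(limit):
--         cnt, acc, nxt = 1, 0, None
--         for x in arr:
--             if acc + x > limit:
--                 cnt += 1
--                 if nxt is None or acc + x < nxt:
--                     nxt = acc + x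
--                 acc = x
--             else:
--                 acc += x
--         return cnt, nxt
--
--     if not arr:
--         return 0
--     hi = arr[0]
--     total = 0
--     for x in arr:
--         if x > hi:
--             hi = x
--         total += x
--     t = hi if hi > 1 else 1
--     while t <= total:
--         cnt, nxt = count_and_next(t)
--         if cnt <= m:
--             return t
--         if nxt is None:
--             return 0
--         t = nxt
--     return 0
-- ===== Notes on version B (the rewrite author's own statement) =====
-- stated objective: alternative
-- what changed: Replaces A's record-and-continue binary search over [1, sum(arr)] with an event-driven upward scan of candidate thresholds: starting at max(arr), one greedy pass both counts segments and finds the smallest overflowing segment sum, which is the next threshold tried; the first feasible threshold is returned. Pre_ excludes mixed-sign arrays with 0 < m < len(arr), where the feasibility predicate A binary-searches is not monotone and A's result is a path-dependent accident of the search.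
-- outside the precondition, e.g. on solution(5, 2, [7, 3, -5, 8, 3]): A returns 11, B returns 9
import Mathlib
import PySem

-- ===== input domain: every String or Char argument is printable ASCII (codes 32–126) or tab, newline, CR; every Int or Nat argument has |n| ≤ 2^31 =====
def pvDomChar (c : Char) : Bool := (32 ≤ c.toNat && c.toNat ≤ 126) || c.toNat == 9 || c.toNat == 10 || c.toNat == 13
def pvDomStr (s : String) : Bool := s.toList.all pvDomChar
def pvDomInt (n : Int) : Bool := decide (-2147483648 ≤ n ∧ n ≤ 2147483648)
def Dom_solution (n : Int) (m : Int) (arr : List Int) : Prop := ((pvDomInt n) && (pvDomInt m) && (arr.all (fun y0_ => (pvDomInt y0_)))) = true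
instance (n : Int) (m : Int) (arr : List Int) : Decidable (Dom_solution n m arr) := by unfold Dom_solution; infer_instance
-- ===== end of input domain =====

-- B replaces A's record-and-continue binary search over [1, sum(arr)] by a direct upward
-- linear scan of candidate thresholds from max(arr); equivalence is proved on Pre_solution
-- (all elements nonnegative, or m ≤ 0, or m ≥ len(arr)), where the feasibility predicate is monotone.


-- ===== PORT A =====
-- Count(amount): greedy segment count, state (cnt, sum)
def countA (arr : List Int) (amount : Int) : Int :=
  (arr.foldl (fun (s : Int × Int) x =>
      if s.2 + x > amount then (s.1 + 1, x) else (s.1, s.2 + x)) ((1 : Int), (0 : Int))).1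

-- max(arr); Python raises on []: in A it is only evaluated when the while-loop runs,
-- which requires 1 ≤ sum(arr), hence arr ≠ [] there — the default 0 is never observed.
def maxA (arr : List Int) : Int := ((PySem.List.max? arr (fun y => y)).getD 0)

-- the while lt <= rt loop; res/lt/rt as loop state
def loopA (arr : List Int) (m lt rt res : Int) : Int :=
  if _h : lt ≤ rt then
    let mid := PySem.Int.floordiv (lt + rt) 2
    if mid ≥ maxA arr ∧ countA arr mid ≤ m then loopA arr m lt (mid - 1) mid
    else loopA arr m (mid + 1) rt res
  else res
termination_by (rt - lt + 1).toNat
decreasing_by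
  · have h2 := PySem.Int.floordiv_two_mid_bounds (lo := lt) (hi := rt) _h
    omega
  · have h2 := PySem.Int.floordiv_two_mid_bounds (lo := lt) (hi := rt) _h
    omega

def solution (n : Int) (m : Int) (arr : List Int) : Int :=
  loopA arr m 1 arr.sum 0

-- ===== PORT B =====
-- count_and_next(limit): one greedy pass, state (cnt, acc, nxt)
def cnStep (limit : Int) (s : Int × Int × Option Int) (x : Int) : Int × Int × Option Int :=
  if s.2.1 + x > limit then
    (s.1 + 1, x,
      match s.2.2 with
      | none => some (s.2.1 + x)
      | some v => if s.2.1 + x < v then some (s.2.1 + x) else some v)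
  else (s.1, s.2.1 + x, s.2.2)

def cntNext (arr : List Int) (limit : Int) : Int × Int × Option Int :=
  arr.foldl (cnStep limit) (1, 0, none)

-- every recorded overflow sum exceeds the tested limit (cited by scanB2's decreasing_by)
lemma cn_next_gt (limit : Int) : ∀ (arr : List Int) (c a : Int) (j : Option Int),
    (∀ w, j = some w → limit < w) →
    ∀ v, (arr.foldl (cnStep limit) (c, a, j)).2.2 = some v → limit < v := by
  intro arr
  induction arr with
  | nil => intro c a j hj v hv; exact hj v (by simpa using hv)
  | cons x rest ih =>
    intro c a j hj v hv
    simp only [List.foldl_cons] at hv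
    by_cases h : a + x > limit
    · cases j with
      | none =>
        rw [show cnStep limit (c, a, none) x = (c + 1, x, some (a + x)) from by
            simp [cnStep, h]] at hv
        refine ih _ _ _ ?_ v hv
        intro w hw; injection hw with hw; omega
      | some u =>
        have hu := hj u rfl
        rw [show cnStep limit (c, a, some u) x =
            (c + 1, x, if a + x < u then some (a + x) else some u) from by
            simp [cnStep, h]] at hv
        refine ih _ _ _ ?_ v hv
        intro w hw
        split at hw <;> (injection hw with hw; omega)
    · rw [show cnStep limit (c, a, j) x = (c, a + x, j) from by simp [cnStep, h]] at hv
      exact ih _ _ _ hj v hv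

-- the jump scan 'while t <= total'
def scanB2 (arr : List Int) (m t total : Int) : Int :=
  if _h : t ≤ total then
    if (cntNext arr t).1 ≤ m then t
    else
      match _hj : (cntNext arr t).2.2 with
      | none => 0
      | some v => scanB2 arr m v total
  else 0
termination_by (total - t + 1).toNat
decreasing_by
  have hv := cn_next_gt t arr 1 0 none (by intro w hw; cases hw) v
    (by simpa [cntNext] using _hj)
  omega

def solution_alt (n : Int) (m : Int) (arr : List Int) : Int :=
  match arr with
  | [] => 0
  | h :: _ =>
    -- one pass computing (hi, total) = (running max, running sum)
    let p := arr.foldl (fun (s : Int × Int) x => (if x > s.1 then x else s.1, s.2 + x)) (h, 0)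
    scanB2 arr m (if p.1 > 1 then p.1 else 1) p.2

-- ===== PRECONDITION & SPEC =====
-- Pre_ excludes mixed-sign arrays with 0 < m < len(arr): there the greedy feasibility
-- predicate A binary-searches is not monotone, so A's result is a path-dependent accident
-- of the search (it can even miss every feasible threshold), which B's first-feasible scan
-- cannot and should not reproduce.
def Pre_solution (n : Int) (m : Int) (arr : List Int) : Prop :=
  (∀ x ∈ arr, 0 ≤ x) ∨ m ≤ 0 ∨ (arr.length : Int) ≤ m
instance (n : Int) (m : Int) (arr : List Int) : Decidable (Pre_solution n m arr) := by
  unfold Pre_solution; infer_instance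

def pvWitness_solution : Int × Int × List Int := (5, 3, [5, 1, 4, 2])

def Spec_solution (n : Int) (m : Int) (arr : List Int) (out : Int) : Prop := out = solution_alt n m arr
instance (n : Int) (m : Int) (arr : List Int) (out : Int) : Decidable (Spec_solution n m arr out) := by unfold Spec_solution; infer_instance

-- ===== CLAIM (what is proved, stated in full; the proofs are below) =====
def Claim_equal_solution : Prop := ∀ (n : Int) (m : Int) (arr : List Int), Dom_solution n m arr → Pre_solution n m arr → Spec_solution n m arr (solution n m arr)

-- ===== LEMMAS AND PROOFS =====

-- the feasibility predicate A searches for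
def Feas (arr : List Int) (m t : Int) : Prop := t ≥ maxA arr ∧ countA arr t ≤ m

-- "r is the first t in [lo, hi] with Feas, else dflt": the common functional spec
def BSpec (arr : List Int) (m lo hi dflt r : Int) : Prop :=
  (lo ≤ r ∧ r ≤ hi ∧ Feas arr m r ∧ ∀ t, lo ≤ t → t < r → ¬ Feas arr m t) ∨
  (r = dflt ∧ ∀ t, lo ≤ t → t ≤ hi → ¬ Feas arr m t)

lemma bspec_unique {arr : List Int} {m lo hi dflt r r' : Int}
    (h : BSpec arr m lo hi dflt r) (h' : BSpec arr m lo hi dflt r') : r = r' := by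
  rcases h with ⟨h1, h2, h3, h4⟩ | ⟨h1, h2⟩ <;> rcases h' with ⟨g1, g2, g3, g4⟩ | ⟨g1, g2⟩
  · rcases lt_trichotomy r r' with hc | hc | hc
    · exact absurd h3 (g4 r h1 hc)
    · exact hc
    · exact absurd g3 (h4 r' g1 hc)
  · exact absurd h3 (g2 r h1 h2)
  · exact absurd g3 (h2 r' g1 g2)
  · omega

-- fold fst is ≥ its start and ≤ start + length
lemma count_fold_fst_bounds (arr : List Int) (t : Int) (c a : Int) :
    c ≤ (arr.foldl (fun (s : Int × Int) x =>
        if s.2 + x > t then (s.1 + 1, x) else (s.1, s.2 + x)) (c, a)).1 ∧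
    (arr.foldl (fun (s : Int × Int) x =>
        if s.2 + x > t then (s.1 + 1, x) else (s.1, s.2 + x)) (c, a)).1 ≤ c + arr.length := by
  induction arr generalizing c a with
  | nil => simp
  | cons x rest ih =>
    simp only [List.foldl_cons, List.length_cons]
    split_ifs
    · have := ih (c + 1) x; constructor <;> [omega; (push_cast; omega)]
    · have := ih c (a + x); constructor <;> [omega; (push_cast; omega)]

lemma countA_ge_one (arr : List Int) (t : Int) : 1 ≤ countA arr t :=
  (count_fold_fst_bounds arr t 1 0).1

-- when every element is ≤ t, the first element never opens a new segment: count ≤ length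
lemma countA_le_length {arr : List Int} {t : Int} (hne : arr ≠ [])
    (hle : ∀ x ∈ arr, x ≤ t) : countA arr t ≤ (arr.length : Int) := by
  match arr with
  | [] => exact absurd rfl hne
  | x :: rest =>
    have hx : x ≤ t := hle x (List.mem_cons_self)
    unfold countA
    simp only [List.foldl_cons, List.length_cons]
    rw [if_neg (by omega)]
    have := (count_fold_fst_bounds rest t 1 (0 + x)).2
    push_cast
    omega

-- monotone count for nonnegative arrays, with generalized paired states
lemma count_fold_mono (arr : List Int) (t t' : Int) (ht : t ≤ t')
    (hnn : ∀ x ∈ arr, 0 ≤ x) :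
    ∀ c a c' a', 0 ≤ a → 0 ≤ a' → c' ≤ c → (c' = c → a' ≤ a) →
    (arr.foldl (fun (s : Int × Int) x =>
        if s.2 + x > t' then (s.1 + 1, x) else (s.1, s.2 + x)) (c', a')).1 ≤
    (arr.foldl (fun (s : Int × Int) x =>
        if s.2 + x > t then (s.1 + 1, x) else (s.1, s.2 + x)) (c, a)).1 := by
  induction arr with
  | nil => intro c a c' a' _ _ h _; simpa using h
  | cons x rest ih =>
    intro c a c' a' ha ha' hc hca
    have hx : 0 ≤ x := hnn x (List.mem_cons_self)
    have hrest : ∀ y ∈ rest, 0 ≤ y := fun y hy => hnn y (List.mem_cons_of_mem x hy)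
    simp only [List.foldl_cons]
    have ih' := ih hrest
    split_ifs with h1 h2 h2
    · -- both overflow
      exact ih' (c + 1) x (c' + 1) x hx hx (by omega) (by omega)
    · -- t'-side overflows, t-side not: forces c' < c
      have hlt : c' < c := by
        rcases lt_or_eq_of_le hc with h | h
        · exact h
        · exfalso; have := hca h; omega
      exact ih' c (a + x) (c' + 1) x (by omega) hx (by omega) (by omega)
    · -- t-side overflows, t'-side not
      exact ih' (c + 1) x c' (a' + x) hx (by omega) (by omega) (by omega)
    · -- neither overflows
      exact ih' c (a + x) c' (a' + x) (by omega) (by omega) hc (by omega)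

lemma countA_mono {arr : List Int} {t t' : Int} (hnn : ∀ x ∈ arr, 0 ≤ x) (ht : t ≤ t') :
    countA arr t' ≤ countA arr t :=
  count_fold_mono arr t t' ht hnn 1 0 1 0 le_rfl le_rfl le_rfl (fun _ => le_rfl)

-- every element is ≤ maxA (nonempty list)
lemma le_maxA {arr : List Int} (hne : arr ≠ []) : ∀ x ∈ arr, x ≤ maxA arr := by
  intro x hx
  rcases hmv : PySem.List.max? arr (fun y => y) with _ | mv
  · exact absurd ((PySem.List.max?_eq_none_iff arr (fun y => y)).1 hmv) hne
  · have := PySem.List.max?_isMax hmv x hx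
    simpa [maxA, hmv] using this

-- under Pre_, Feas is upward closed
lemma feas_mono {n m : Int} {arr : List Int} (hpre : Pre_solution n m arr)
    {t t' : Int} (ht : t ≤ t') (hf : Feas arr m t) : Feas arr m t' := by
  obtain ⟨h1, h2⟩ := hf
  refine ⟨by omega, ?_⟩
  rcases hpre with hnn | hm | hlen
  · exact le_trans (countA_mono hnn ht) h2
  · have := countA_ge_one arr t; omega
  · rcases eq_or_ne arr [] with rfl | hne
    · simpa [countA] using h2
    · have := countA_le_length (t := t') hne (fun x hx => le_trans (le_maxA hne x hx) (by omega))
      omega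

-- A's binary search satisfies the functional spec when Feas is monotone
lemma loopA_bspec_aux (arr : List Int) (m : Int)
    (hmono : ∀ t t', t ≤ t' → Feas arr m t → Feas arr m t') :
    ∀ (N : Nat) (lt rt res : Int), (rt - lt + 1).toNat ≤ N →
      BSpec arr m lt rt res (loopA arr m lt rt res) := by
  intro N
  induction N with
  | zero =>
    intro lt rt res hN
    rw [loopA, dif_neg (by omega)]
    exact Or.inr ⟨rfl, by intro t h1 h2 _; omega⟩
  | succ N ih =>
    intro lt rt res hN
    rw [loopA]
    by_cases hle : lt ≤ rt
    · rw [dif_pos hle]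
      have hmid := PySem.Int.floordiv_two_mid_bounds (lo := lt) (hi := rt) hle
      show BSpec arr m lt rt res
        (if PySem.Int.floordiv (lt + rt) 2 ≥ maxA arr ∧
            countA arr (PySem.Int.floordiv (lt + rt) 2) ≤ m then
          loopA arr m lt (PySem.Int.floordiv (lt + rt) 2 - 1) (PySem.Int.floordiv (lt + rt) 2)
        else loopA arr m (PySem.Int.floordiv (lt + rt) 2 + 1) rt res)
      set mid := PySem.Int.floordiv (lt + rt) 2 with hmiddef
      by_cases hfeas : mid ≥ maxA arr ∧ countA arr mid ≤ m
      · rw [if_pos hfeas]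
        have hfm : Feas arr m mid := hfeas
        rcases ih lt (mid - 1) mid (by omega) with ⟨i1, i2, i3, i4⟩ | ⟨i1, i2⟩
        · exact Or.inl ⟨i1, by omega, i3, i4⟩
        · refine Or.inl ⟨by omega, by omega, by rw [i1]; exact hfm, ?_⟩
          intro t h1 h2; rw [i1] at h2; exact i2 t h1 (by omega)
      · rw [if_neg hfeas]
        have hnf : ¬ Feas arr m mid := hfeas
        have hlow : ∀ t, t ≤ mid → ¬ Feas arr m t := fun t h hft => hnf (hmono t mid h hft)
        rcases ih (mid + 1) rt res (by omega) with ⟨i1, i2, i3, i4⟩ | ⟨i1, i2⟩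
        · refine Or.inl ⟨by omega, i2, i3, ?_⟩
          intro t h1 h2
          rcases le_or_gt t mid with h | h
          · exact hlow t h
          · exact i4 t (by omega) h2
        · refine Or.inr ⟨i1, ?_⟩
          intro t h1 h2
          rcases le_or_gt t mid with h | h
          · exact hlow t h
          · exact i2 t (by omega) h2
    · rw [dif_neg hle]
      exact Or.inr ⟨rfl, by intro t h1 h2 _; omega⟩

lemma loopA_bspec (arr : List Int) (m : Int)
    (hmono : ∀ t t', t ≤ t' → Feas arr m t → Feas arr m t') :
    ∀ lt rt res, BSpec arr m lt rt res (loopA arr m lt rt res) :=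
  fun lt rt res => loopA_bspec_aux arr m hmono (rt - lt + 1).toNat lt rt res le_rfl

-- the cnt/acc components of B's pass are exactly A's greedy pair fold
lemma cn_pair_eq (t : Int) : ∀ (arr : List Int) (c a : Int) (j : Option Int),
    (arr.foldl (cnStep t) (c, a, j)).1 =
      (arr.foldl (fun (s : Int × Int) x =>
        if s.2 + x > t then (s.1 + 1, x) else (s.1, s.2 + x)) (c, a)).1 ∧
    (arr.foldl (cnStep t) (c, a, j)).2.1 =
      (arr.foldl (fun (s : Int × Int) x =>
        if s.2 + x > t then (s.1 + 1, x) else (s.1, s.2 + x)) (c, a)).2 := by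
  intro arr
  induction arr with
  | nil => intro c a j; exact ⟨rfl, rfl⟩
  | cons x rest ih =>
    intro c a j
    simp only [List.foldl_cons]
    by_cases h : a + x > t
    · rw [show cnStep t (c, a, j) x = (c + 1, x,
          match j with
          | none => some (a + x)
          | some u => if a + x < u then some (a + x) else some u) from by simp [cnStep, h],
        if_pos h]
      exact ih _ _ _
    · rw [show cnStep t (c, a, j) x = (c, a + x, j) from by simp [cnStep, h], if_neg h]
      exact ih _ _ _

lemma cn_count_eq (arr : List Int) (t : Int) : (cntNext arr t).1 = countA arr t :=
  (cn_pair_eq t arr 1 0 none).1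

-- starting from a recorded candidate, the final candidate can only shrink
lemma cn_nxt_le (t : Int) : ∀ (arr : List Int) (c a w v : Int),
    (arr.foldl (cnStep t) (c, a, some w)).2.2 = some v → v ≤ w := by
  intro arr
  induction arr with
  | nil => intro c a w v hv; simp at hv; omega
  | cons x rest ih =>
    intro c a w v hv
    simp only [List.foldl_cons] at hv
    by_cases h : a + x > t
    · rw [show cnStep t (c, a, some w) x =
          (c + 1, x, if a + x < w then some (a + x) else some w) from by simp [cnStep, h]] at hv
      split at hv
      · have := ih _ _ _ _ hv; omega
      · exact ih _ _ _ _ hv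
    · rw [show cnStep t (c, a, some w) x = (c, a + x, some w) from by simp [cnStep, h]] at hv
      exact ih _ _ _ _ hv

-- no recorded candidate means the pass never overflowed: cnt keeps its start value
lemma cn_stays_some (t : Int) : ∀ (arr : List Int) (c a w : Int),
    ∃ v, (arr.foldl (cnStep t) (c, a, some w)).2.2 = some v := by
  intro arr
  induction arr with
  | nil => intro c a w; exact ⟨w, rfl⟩
  | cons x rest ih =>
    intro c a w
    simp only [List.foldl_cons]
    by_cases h : a + x > t
    · rw [show cnStep t (c, a, some w) x =
          (c + 1, x, if a + x < w then some (a + x) else some w) from by simp [cnStep, h]]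
      split <;> exact ih _ _ _
    · rw [show cnStep t (c, a, some w) x = (c, a + x, some w) from by simp [cnStep, h]]
      exact ih _ _ _

lemma cn_none_count (t : Int) : ∀ (arr : List Int) (c a : Int),
    (arr.foldl (cnStep t) (c, a, none)).2.2 = none →
    (arr.foldl (cnStep t) (c, a, none)).1 = c := by
  intro arr
  induction arr with
  | nil => intro c a _; rfl
  | cons x rest ih =>
    intro c a hv
    simp only [List.foldl_cons] at hv ⊢
    by_cases h : a + x > t
    · rw [show cnStep t (c, a, (none : Option Int)) x = (c + 1, x, some (a + x)) from by
          simp [cnStep, h]] at hv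
      obtain ⟨v, hv'⟩ := cn_stays_some t rest (c + 1) x (a + x)
      rw [hv'] at hv; cases hv
    · rw [show cnStep t (c, a, (none : Option Int)) x = (c, a + x, none) from by
          simp [cnStep, h]] at hv ⊢
      exact ih _ _ hv

-- below the recorded candidate nothing changes: the greedy pass at any t' ∈ [t, v)
-- takes exactly the same branches as at t
lemma cn_states_eq (t t' : Int) (ht : t ≤ t') : ∀ (arr : List Int) (c a : Int)
    (j j' : Option Int) (v : Int),
    (arr.foldl (cnStep t) (c, a, j)).2.2 = some v → t' < v →
    (arr.foldl (cnStep t') (c, a, j')).1 = (arr.foldl (cnStep t) (c, a, j)).1 ∧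
    (arr.foldl (cnStep t') (c, a, j')).2.1 = (arr.foldl (cnStep t) (c, a, j)).2.1 := by
  intro arr
  induction arr with
  | nil => intro c a j j' v _ _; exact ⟨rfl, rfl⟩
  | cons x rest ih =>
    intro c a j j' v hv hlt
    simp only [List.foldl_cons] at hv ⊢
    by_cases h : a + x > t
    · -- the final candidate is ≤ this overflow sum a + x, so t' < a + x: break at t' too
      have hvle : v ≤ a + x := by
        cases j with
        | none =>
          rw [show cnStep t (c, a, none) x = (c + 1, x, some (a + x)) from by
              simp [cnStep, h]] at hv
          exact cn_nxt_le t rest _ _ _ _ hv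
        | some u =>
          rw [show cnStep t (c, a, some u) x =
              (c + 1, x, if a + x < u then some (a + x) else some u) from by
              simp [cnStep, h]] at hv
          by_cases hu : a + x < u
          · rw [if_pos hu] at hv; exact cn_nxt_le t rest _ _ _ _ hv
          · rw [if_neg hu] at hv; have := cn_nxt_le t rest _ _ _ _ hv; omega
      have h' : a + x > t' := by omega
      have hs : ∃ jn, cnStep t (c, a, j) x = (c + 1, x, jn) := by
        cases j with
        | none => exact ⟨some (a + x), by simp [cnStep, h]⟩
        | some u => exact ⟨if a + x < u then some (a + x) else some u, by simp [cnStep, h]⟩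
      have hs' : ∃ jn', cnStep t' (c, a, j') x = (c + 1, x, jn') := by
        cases j' with
        | none => exact ⟨some (a + x), by simp [cnStep, h']⟩
        | some u => exact ⟨if a + x < u then some (a + x) else some u, by simp [cnStep, h']⟩
      obtain ⟨jn, hjn⟩ := hs
      obtain ⟨jn', hjn'⟩ := hs'
      rw [hjn] at hv
      rw [hjn, hjn']
      exact ih _ _ _ _ _ hv hlt
    · have h' : ¬ (a + x > t') := by omega
      rw [show cnStep t (c, a, j) x = (c, a + x, j) from by simp [cnStep, h]] at hv
      rw [show cnStep t (c, a, j) x = (c, a + x, j) from by simp [cnStep, h],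
          show cnStep t' (c, a, j') x = (c, a + x, j') from by simp [cnStep, h']]
      exact ih _ _ _ _ _ hv hlt

lemma countA_eq_of_lt_next {arr : List Int} {t t' v : Int} (ht : t ≤ t')
    (hv : (cntNext arr t).2.2 = some v) (hlt : t' < v) : countA arr t' = countA arr t := by
  rw [← cn_count_eq, ← cn_count_eq]
  exact (cn_states_eq t t' ht arr 1 0 none none v (by simpa [cntNext] using hv) hlt).1

-- B's jump scan satisfies the functional spec on [t, total], provided t clears maxA
lemma scanB2_bspec_aux (arr : List Int) (m total : Int) :
    ∀ (N : Nat) (t : Int), (total - t + 1).toNat ≤ N → maxA arr ≤ t →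
      BSpec arr m t total 0 (scanB2 arr m t total) := by
  intro N
  induction N with
  | zero =>
    intro t hN _
    rw [scanB2, dif_neg (by omega)]
    exact Or.inr ⟨rfl, by intro s h1 h2 _; omega⟩
  | succ N ih =>
    intro t hN hmx
    rw [scanB2]
    by_cases hle : t ≤ total
    · rw [dif_pos hle]
      by_cases hc : (cntNext arr t).1 ≤ m
      · rw [if_pos hc]
        refine Or.inl ⟨le_rfl, hle, ⟨hmx, by rw [← cn_count_eq]; exact hc⟩, ?_⟩
        intro s h1 h2 _; omega
      · rw [if_neg hc]
        split
        · rename_i hj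
          have h1 : (cntNext arr t).1 = 1 := cn_none_count t arr 1 0 (by simpa [cntNext] using hj)
          refine Or.inr ⟨rfl, ?_⟩
          intro s _ _ hf
          have := countA_ge_one arr s
          have := hf.2
          omega
        · rename_i v hj
          have hv : t < v := cn_next_gt t arr 1 0 none (by intro w hw; cases hw) v
            (by simpa [cntNext] using hj)
          have hnof : ∀ s, t ≤ s → s < v → ¬ Feas arr m s := by
            intro s hs1 hs2 hf
            have heq : countA arr s = countA arr t := countA_eq_of_lt_next hs1 hj hs2
            have hcm : ¬ countA arr t ≤ m := by rw [← cn_count_eq]; exact hc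
            have hfs := hf.2
            omega
          rcases ih v (by omega) (by omega) with ⟨i1, i2, i3, i4⟩ | ⟨i1, i2⟩
          · refine Or.inl ⟨by omega, i2, i3, ?_⟩
            intro s h1 h2
            rcases lt_or_ge s v with hcc | hcc
            · exact hnof s h1 hcc
            · exact i4 s hcc h2
          · refine Or.inr ⟨i1, ?_⟩
            intro s h1 h2
            rcases lt_or_ge s v with hcc | hcc
            · exact hnof s h1 hcc
            · exact i2 s hcc h2
    · rw [dif_neg hle]
      exact Or.inr ⟨rfl, by intro s h1 h2 _; omega⟩
lemma scanB2_bspec (arr : List Int) (m total : Int) :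
    ∀ t, maxA arr ≤ t → BSpec arr m t total 0 (scanB2 arr m t total) :=
  fun t h => scanB2_bspec_aux arr m total (total - t + 1).toNat t le_rfl h

-- B's one-pass (hi, total) accumulator: componentwise
lemma pairfold_eq (arr : List Int) (h a : Int) :
    arr.foldl (fun (s : Int × Int) x => (if x > s.1 then x else s.1, s.2 + x)) (h, a) =
      (arr.foldl (fun acc x => if x > acc then x else acc) h, a + arr.sum) := by
  rw [PySem.List.foldl_prod_mk (f := fun acc x => if x > acc then x else acc)
        (g := fun acc x => acc + x)]
  rw [PySem.List.foldl_add (g := fun x => x)]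
  simp

lemma runmax_eq_foldl_max (arr : List Int) (h : Int) :
    arr.foldl (fun acc x => if x > acc then x else acc) h = arr.foldl max h := by
  apply PySem.List.foldl_congr_mem
  intro acc x _
  rcases le_or_gt x acc with hc | hc <;> simp [max_def] <;> omega

-- B's running max over h :: rest equals maxA (h :: rest)
lemma runmax_eq_maxA (h : Int) (rest : List Int) :
    (h :: rest).foldl (fun acc x => if x > acc then x else acc) h = maxA (h :: rest) := by
  rw [runmax_eq_foldl_max]
  have hcons : maxA (h :: rest) = rest.foldl max h := by
    simp [maxA, PySem.List.max?_id_cons]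
  rw [hcons]
  simp [List.foldl_cons, max_self]

-- the scan's lower bound clears maxA, and thresholds below it are infeasible
lemma solution_eq_alt (n m : Int) (arr : List Int) (hpre : Pre_solution n m arr) :
    solution n m arr = solution_alt n m arr := by
  match arr with
  | [] =>
    -- A: rt = 0 < 1 = lt, the loop never runs, res = 0; B: 0 directly
    simp only [solution, solution_alt, List.sum_nil]
    rw [loopA, dif_neg (by omega)]
  | h :: rest =>
    have hmono := fun t t' ht hf =>
      feas_mono (n := n) (m := m) (arr := h :: rest) hpre (t := t) (t' := t') ht hf
    have hA := loopA_bspec (h :: rest) m hmono 1 (h :: rest).sum 0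
    have hne : (h :: rest) ≠ [] := by simp
    simp only [solution, solution_alt]
    rw [pairfold_eq, runmax_eq_maxA, zero_add]
    set L : Int := if maxA (h :: rest) > 1 then maxA (h :: rest) else 1 with hL
    have hLmx : maxA (h :: rest) ≤ L := by rw [hL]; split <;> omega
    have hL1 : 1 ≤ L := by rw [hL]; split <;> omega
    have hB := scanB2_bspec (h :: rest) m ((h :: rest).sum) L hLmx
    -- lift B's spec from [L, sum] to [1, sum]
    have hB' : BSpec (h :: rest) m 1 (h :: rest).sum 0 (scanB2 (h :: rest) m L (h :: rest).sum) := by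
      have hbelow : ∀ t, 1 ≤ t → t < L → ¬ Feas (h :: rest) m t := by
        intro t h1 h2 hf
        have := hf.1
        rw [hL] at h2
        split at h2 <;> omega
      rcases hB with ⟨i1, i2, i3, i4⟩ | ⟨i1, i2⟩
      · refine Or.inl ⟨by omega, i2, i3, ?_⟩
        intro t h1 h2
        rcases lt_or_ge t L with hc | hc
        · exact hbelow t h1 hc
        · exact i4 t hc h2
      · refine Or.inr ⟨i1, ?_⟩
        intro t h1 h2
        rcases lt_or_ge t L with hc | hc
        · exact hbelow t h1 hc
        · exact i2 t hc h2
    exact bspec_unique hA hB'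

-- ===== VERDICT (by name: the statement is the Claim_ definition above) =====
theorem solution_spec : Claim_equal_solution := by
  intro n m arr _ hpre
  unfold Spec_solution
  exact solution_eq_alt n m arr hpre
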